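-- pv_equiv track=rewrite | github.com/Haj1h0/programmers_solutions_python | level_1/컨트롤 제트.py | solution
-- ===== SOURCE A (Python) =====
-- def solution(s):
--     ans = []
--     for i in s.split():
--         if i != "Z":
--             ans.append(i)
--         else:
--             ans.pop()
--
--     return sum(list(map(int, ans)))
-- ===== SOURCE B (Python) =====
-- def solution(s):
--     total = 0
--     skip = 0
--     for tok in reversed(s.split()):
--         if tok == "Z":
--             skip += 1
--         elif skip:
--             skip -= 1
--         else:
--             total += int(tok)
--     return total
-- ===== Notes on version B (the rewrite author's own statement) =====
-- stated objective: alternative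
-- what changed: B scans the tokens right-to-left with a pending-cancel counter instead of A's left-to-right stack of token strings followed by a sum(map(int,...)) pass: a cancel token increments the counter, a number is either consumed by the counter or parsed lazily and added to a running total, so no stack and no second pass exist.
-- outside the precondition, e.g. on solution('Z'): A raises IndexError, B returns 0
import Mathlib
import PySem

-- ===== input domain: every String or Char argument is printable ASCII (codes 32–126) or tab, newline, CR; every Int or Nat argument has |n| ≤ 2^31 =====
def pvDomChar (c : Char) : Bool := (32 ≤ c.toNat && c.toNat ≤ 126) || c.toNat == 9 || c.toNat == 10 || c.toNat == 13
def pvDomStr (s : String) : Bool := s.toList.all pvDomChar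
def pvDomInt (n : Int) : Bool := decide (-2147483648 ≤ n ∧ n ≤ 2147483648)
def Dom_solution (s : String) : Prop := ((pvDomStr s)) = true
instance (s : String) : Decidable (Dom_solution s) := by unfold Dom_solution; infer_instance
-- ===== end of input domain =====

-- B replaces A's token stack plus final sum(map(int,...)) pass by a single right-to-left scan
-- with a pending-cancel counter and a running total (same asymptotic cost, different algorithm).

-- ===== PORT A =====
-- list.pop() on an empty list raises IndexError and int() raises ValueError on an unparsable
-- surviving token; both are excluded by Pre_solution, so the total stand-ins dropLast / getD 0
-- are never reached on admitted inputs.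
def solution (s : String) : Int :=
  let ans := (PySem.Str.split₀ s).foldl
    (fun ans i => if i ≠ "Z" then ans ++ [i] else ans.dropLast) []
  (ans.map (fun t => (PySem.Int.ofStr? t).getD 0)).sum

-- ===== PORT B =====
-- int(tok) raises ValueError on an unparsable token B parses (a surviving token); excluded by
-- Pre_solution, so getD 0 is never reached on admitted inputs.
def solution_alt (s : String) : Int :=
  let st := ((PySem.Str.split₀ s).reverse).foldl
    (fun (acc : Int × Nat) tok =>
      if tok == "Z" then (acc.1, acc.2 + 1)
      else if acc.2 ≠ 0 then (acc.1, acc.2 - 1)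
      else (acc.1 + (PySem.Int.ofStr? tok).getD 0, acc.2))
    ((0 : Int), (0 : Nat))
  st.1

-- ===== PRECONDITION & SPEC =====
-- Pre_ excludes exactly the inputs where Python A raises: (a) some prefix of the tokens contains
-- more "Z" than numbers, so a pop hits an empty list (IndexError); (b) a token that survives all
-- cancellations is not parseable as an int (ValueError in the final sum).
def Pre_solution (s : String) : Prop :=
  (∀ n, n ≤ (PySem.Str.split₀ s).length →
    2 * ((PySem.Str.split₀ s).take n).count "Z" ≤ n) ∧
  (∀ i, i < (PySem.Str.split₀ s).length →
    ((PySem.Str.split₀ s).getD i "" ≠ "Z" →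
      (∀ j, i ≤ j → j < (PySem.Str.split₀ s).length →
        2 * (((PySem.Str.split₀ s).drop i).take (j + 1 - i)).count "Z" < j + 1 - i) →
      (PySem.Int.ofStr? ((PySem.Str.split₀ s).getD i "")).isSome))
instance (s : String) : Decidable (Pre_solution s) := by unfold Pre_solution; infer_instance

def pvWitness_solution : String := "1 2 Z 3"

def Spec_solution (s : String) (out : Int) : Prop := out = solution_alt s
instance (s : String) (out : Int) : Decidable (Spec_solution s out) := by unfold Spec_solution; infer_instance

-- ===== CLAIM (what is proved, stated in full; the proofs are below) =====
def Claim_equal_solution : Prop := ∀ (s : String), Dom_solution s → Pre_solution s → Spec_solution s (solution s)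

-- ===== LEMMAS AND PROOFS =====

-- The bridge invariant: running B's right-to-left step as a foldr yields a pair (t, k) such that,
-- for ANY initial stack ans0, A's stack run over the same tokens ends with total
-- sum(ans0 minus its last k entries) + t.
theorem pv_inv (l : List String) (ans0 : List String) :
    (((l.foldl (fun ans i => if i ≠ "Z" then ans ++ [i] else ans.dropLast) ans0).map
        (fun t => (PySem.Int.ofStr? t).getD 0)).sum)
    = ((ans0.take (ans0.length -
          (l.foldr (fun tok (acc : Int × Nat) =>
            if tok == "Z" then (acc.1, acc.2 + 1)
            else if acc.2 ≠ 0 then (acc.1, acc.2 - 1)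
            else (acc.1 + (PySem.Int.ofStr? tok).getD 0, acc.2)) ((0 : Int), (0 : Nat))).2)).map
        (fun t => (PySem.Int.ofStr? t).getD 0)).sum
      + (l.foldr (fun tok (acc : Int × Nat) =>
            if tok == "Z" then (acc.1, acc.2 + 1)
            else if acc.2 ≠ 0 then (acc.1, acc.2 - 1)
            else (acc.1 + (PySem.Int.ofStr? tok).getD 0, acc.2)) ((0 : Int), (0 : Nat))).1 := by
  induction l generalizing ans0 with
  | nil => simp
  | cons tok l ih =>
    by_cases ht : tok = "Z"
    · subst ht
      simp only [List.foldl_cons, List.foldr_cons, ne_eq, not_true_eq_false, if_false,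
        beq_self_eq_true, if_true]
      rw [ih ans0.dropLast]
      set F := l.foldr (fun tok (acc : Int × Nat) =>
            if tok == "Z" then (acc.1, acc.2 + 1)
            else if acc.2 ≠ 0 then (acc.1, acc.2 - 1)
            else (acc.1 + (PySem.Int.ofStr? tok).getD 0, acc.2)) ((0 : Int), (0 : Nat)) with hF
      have hx : ans0.dropLast.take (ans0.dropLast.length - F.2)
          = ans0.take (ans0.length - (F.2 + 1)) := by
        rw [List.dropLast_eq_take, List.take_take, List.length_take]
        congr 1
        omega
      rw [hx]
    · have hb : (tok == "Z") = false := by simp [ht]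
      simp only [List.foldl_cons, List.foldr_cons, ne_eq, if_pos ht, hb, Bool.false_eq_true,
        if_false]
      rw [ih (ans0 ++ [tok])]
      set F := l.foldr (fun tok (acc : Int × Nat) =>
            if tok == "Z" then (acc.1, acc.2 + 1)
            else if acc.2 ≠ 0 then (acc.1, acc.2 - 1)
            else (acc.1 + (PySem.Int.ofStr? tok).getD 0, acc.2)) ((0 : Int), (0 : Nat)) with hF
      by_cases hk : F.2 = 0
      · simp only [hk, not_true_eq_false, if_false, List.length_append,
          List.length_cons, List.length_nil]
        rw [List.take_of_length_le (by simp), List.take_of_length_le (by omega)]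
        simp [List.sum_append]
        ring
      · simp only [hk, not_false_eq_true, if_true, List.length_append,
          List.length_cons, List.length_nil]
        have hle : ans0.length + 1 - F.2 ≤ ans0.length := by omega
        rw [List.take_append_of_le_length hle]
        have h3 : ans0.length + 1 - F.2 = ans0.length - (F.2 - 1) := by omega
        rw [h3]

-- ===== VERDICT (by name: the statement is the Claim_ definition above) =====
theorem solution_spec : Claim_equal_solution := by
  intro s _ _
  unfold Spec_solution solution solution_alt
  rw [List.foldl_reverse]
  have h := pv_inv (PySem.Str.split₀ s) []
  simpa using h
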